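-- pv_equiv track=rewrite | github.com/patli96/Leetcode---Medium | String/1268_solution.py | suggestedProducts
-- ===== SOURCE A (Python) =====
-- from typing import List
--
-- def suggestedProducts(products: List[str], searchWord: str) -> List[List[str]]:
--     result = []
--     products.sort()
--     for i in range(len(searchWord)):
--         result.append(
--             sorted([word for word in products if word[:i + 1] == searchWord[:i + 1]])[:3]
--         )
--     return result
-- ===== SOURCE B (Python) =====
-- def suggestedProducts(products, searchWord):
--     cands = sorted(products)
--     result = []
--     for i, c in enumerate(searchWord):
--         cands = [w for w in cands if len(w) > i and w[i] == c]
--         result.append(cands[:3])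
--     return result
-- ===== Notes on version B (the rewrite author's own statement) =====
-- stated objective: faster
-- what changed: Instead of re-scanning and re-sorting the whole product list for every prefix length, B sorts once and incrementally narrows a candidate list by one character per step, so each step only filters the survivors of the previous step and takes its first three without any further sort.
import Mathlib
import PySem

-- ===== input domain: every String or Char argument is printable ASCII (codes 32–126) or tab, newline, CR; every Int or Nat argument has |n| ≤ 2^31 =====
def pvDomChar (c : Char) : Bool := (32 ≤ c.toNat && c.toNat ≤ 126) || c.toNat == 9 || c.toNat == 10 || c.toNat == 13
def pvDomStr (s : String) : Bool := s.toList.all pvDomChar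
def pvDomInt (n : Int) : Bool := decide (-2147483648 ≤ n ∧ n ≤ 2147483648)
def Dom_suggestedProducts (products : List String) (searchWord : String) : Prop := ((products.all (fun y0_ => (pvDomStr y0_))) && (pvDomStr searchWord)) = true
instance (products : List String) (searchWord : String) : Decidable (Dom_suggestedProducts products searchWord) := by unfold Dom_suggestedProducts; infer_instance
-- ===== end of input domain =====

-- B sorts once and then narrows one candidate list character by character instead of re-scanning
-- and re-sorting the whole product list for every prefix length (objective: faster, constant-factor).
-- Note: Python A sorts `products` in place (a side effect B does not have); the equivalence proved
-- here is about the return value only.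

-- ===== PORT A =====
def suggestedProducts (products : List String) (searchWord : String) : List (List String) :=
  let ps := PySem.List.sorted products (fun w => w)      -- products.sort()
  (PySem.List.pyRange 0 (PySem.Str.len searchWord)).foldl
    (fun result i =>
      result ++ [PySem.List.slice
        (PySem.List.sorted
          (ps.filter (fun word =>
            PySem.Str.slice word none (some (i + 1)) ==
              PySem.Str.slice searchWord none (some (i + 1))))
          (fun w => w))
        none (some 3)])
    []

-- ===== PORT B =====
-- the loop body of Source B: for each remaining character c (at index i) narrow cands and emit cands[:3]
def spAltGo (i : Nat) (cands : List String) (sw : List Char) : List (List String) :=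
  match sw with
  | [] => []
  | c :: rest =>
    -- [w for w in cands if len(w) > i and w[i] == c]; w[i] is exact here since the guard i < len(w) holds
    let cands' := cands.filter (fun w => decide (i < w.toList.length) && (w.toList[i]? == some c))
    cands'.take 3 :: spAltGo (i + 1) cands' rest

def suggestedProducts_alt (products : List String) (searchWord : String) : List (List String) :=
  spAltGo 0 (PySem.List.sorted products (fun w => w)) searchWord.toList

-- ===== PRECONDITION & SPEC =====
def Spec_suggestedProducts (products : List String) (searchWord : String) (out : List (List String)) : Prop := out = suggestedProducts_alt products searchWord
instance (products : List String) (searchWord : String) (out : List (List String)) : Decidable (Spec_suggestedProducts products searchWord out) := by unfold Spec_suggestedProducts; infer_instance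

-- ===== CLAIM (what is proved, stated in full; the proofs are below) =====
def Claim_equal_suggestedProducts : Prop := ∀ (products : List String) (searchWord : String), Dom_suggestedProducts products searchWord → Spec_suggestedProducts products searchWord (suggestedProducts products searchWord)




-- ===== LEMMAS AND PROOFS =====

-- the per-prefix predicate of A, over char lists
def spPref (swl : List Char) (k : Nat) (w : String) : Bool :=
  w.toList.take k == swl.take k

-- one narrowing step refines the prefix predicate by one character
theorem spPred_step (swl : List Char) (i : Nat) (hi : i < swl.length) (w : String) :
    (spPref swl i w && (decide (i < w.toList.length) && (w.toList[i]? == some swl[i]))) =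
      spPref swl (i + 1) w := by
  have hsw : swl.take (i + 1) = swl.take i ++ [swl[i]] := by
    rw [List.take_add_one, List.getElem?_eq_getElem hi]; rfl
  have hL : w.toList.length = w.length := by simp
  apply Bool.eq_iff_iff.mpr
  simp only [spPref, Bool.and_eq_true, beq_iff_eq, decide_eq_true_eq]
  constructor
  · rintro ⟨hpre, hlt, hget⟩
    rw [List.take_add_one, hget, hsw, hpre]
    rfl
  · intro h
    have hlen : i < w.toList.length := by
      have hlen' := congrArg List.length h
      rw [hsw] at hlen'
      simp only [List.length_take, List.length_append, List.length_cons, List.length_nil] at hlen'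
      omega
    have hw2 : w.toList.take (i + 1) = w.toList.take i ++ [w.toList[i]] := by
      rw [List.take_add_one, List.getElem?_eq_getElem hlen]; rfl
    rw [hw2, hsw] at h
    have h2 := List.append_inj h (by simp only [List.length_take]; omega)
    refine ⟨h2.1, hlen, ?_⟩
    rw [List.getElem?_eq_getElem hlen]
    simpa using h2.2

-- after i narrowing steps the candidate list is exactly ps filtered by the i-prefix predicate
theorem spGo_eq (ps : List String) (swl : List Char) :
    ∀ (tail : List Char) (i : Nat), tail = swl.drop i → i ≤ swl.length →
      spAltGo i (ps.filter (spPref swl i)) tail =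
        (List.range tail.length).map
          (fun j => (ps.filter (spPref swl (i + j + 1))).take 3) := by
  intro tail
  induction tail with
  | nil => intro i _ _; simp [spAltGo]
  | cons c rest ih =>
    intro i htail hi
    have hilt : i < swl.length := by
      by_contra h
      rw [List.drop_eq_nil_of_le (Nat.le_of_not_lt h)] at htail
      simp at htail
    have hc : c = swl[i] := by
      have h0 : (swl.drop i)[0]? = some swl[i] := by
        rw [List.getElem?_drop]
        simp [List.getElem?_eq_getElem hilt]
      rw [← htail] at h0
      simpa using h0
    have hrest : rest = swl.drop (i + 1) := by
      have := congrArg List.tail htail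
      simpa [List.tail_drop] using this
    simp only [spAltGo]
    have hfuse : (ps.filter (spPref swl i)).filter
        (fun w => decide (i < w.toList.length) && (w.toList[i]? == some c)) =
        ps.filter (spPref swl (i + 1)) := by
      rw [List.filter_filter]
      apply List.filter_congr
      intro w _
      rw [hc, Bool.and_comm]
      exact spPred_step swl i hilt w
    rw [hfuse, ih (i + 1) hrest (by omega)]
    simp only [List.length_cons, List.range_succ_eq_map, List.map_cons, List.map_map]
    refine congrArg₂ List.cons (by norm_num) ?_
    apply List.map_congr_left
    intro j _
    simp only [Function.comp]
    have hj : i + 1 + j + 1 = i + (j + 1) + 1 := by omega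
    rw [hj]

-- A's String-slice prefix test equals spPref
theorem spPred_A (searchWord : String) (k : Nat) (w : String) :
    (PySem.Str.slice w none (some ((k : Int) + 1)) ==
      PySem.Str.slice searchWord none (some ((k : Int) + 1))) =
      spPref searchWord.toList (k + 1) w := by
  have htn : ((k : Int) + 1).toNat = k + 1 := by omega
  have h3 : ∀ (l : List Char), PySem.List.slice l none (some ((k : Int) + 1)) = l.take (k + 1) := by
    intro l
    rw [PySem.List.slice_to l (by positivity), htn]
  apply Bool.eq_iff_iff.mpr
  simp [spPref, ← String.toList_inj, PySem.Str.toList_slice, PySem.Chars.slice_eq_listSlice, h3]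

-- sorting an already-sorted filtered list does nothing
theorem sp_sorted_filter (ps : List String) (hps : ps.Pairwise (· ≤ ·)) (p : String → Bool) :
    PySem.List.sorted (ps.filter p) (fun w => w) = ps.filter p :=
  PySem.List.sorted_eq_self_of_pairwise _ _ (hps.filter p)

-- flatMap of singletons is a map
theorem sp_flatMap_single {α β : Type} (f : α → β) (l : List α) :
    l.flatMap (fun x => [f x]) = l.map f := by
  induction l with
  | nil => rfl
  | cons x xs ih => simp [List.flatMap_cons, ih]

-- ===== VERDICT (by name: the statement is the Claim_ definition above) =====
theorem suggestedProducts_spec : Claim_equal_suggestedProducts := by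
  intro products searchWord _
  unfold Spec_suggestedProducts
  have hpw : (PySem.List.sorted products (fun w => w)).Pairwise (· ≤ ·) :=
    PySem.List.sorted_pairwise products (fun w => w)
  have hlen : ((PySem.Str.len searchWord - 0).toNat) = searchWord.toList.length := by
    simp
  have hA : suggestedProducts products searchWord =
      (List.range searchWord.toList.length).map
        (fun j => ((PySem.List.sorted products (fun w => w)).filter
          (spPref searchWord.toList (j + 1))).take 3) := by
    simp only [suggestedProducts]
    rw [PySem.List.foldl_append_eq_flatMap, PySem.List.pyRange_one, hlen,
      List.flatMap_map, sp_flatMap_single, List.nil_append]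
    apply List.map_congr_left
    intro k _
    have h0k : (0 : Int) + (k : Int) + 1 = (k : Int) + 1 := by ring
    rw [h0k]
    have hp : (fun word => PySem.Str.slice word none (some ((k : Int) + 1)) ==
        PySem.Str.slice searchWord none (some ((k : Int) + 1))) =
        spPref searchWord.toList (k + 1) := funext (spPred_A searchWord k)
    rw [hp, sp_sorted_filter _ hpw, PySem.List.slice_to _ (by norm_num)]
    have h33 : (3 : Int).toNat = 3 := rfl
    rw [h33]
  have hfilter0 : (PySem.List.sorted products (fun w => w)).filter
      (spPref searchWord.toList 0) = PySem.List.sorted products (fun w => w) := by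
    apply List.filter_eq_self.mpr
    intro w _
    simp [spPref]
  have hgo := spGo_eq (PySem.List.sorted products (fun w => w)) searchWord.toList
    searchWord.toList 0 rfl (Nat.zero_le _)
  rw [hfilter0] at hgo
  have hB : suggestedProducts_alt products searchWord =
      (List.range searchWord.toList.length).map
        (fun j => ((PySem.List.sorted products (fun w => w)).filter
          (spPref searchWord.toList (j + 1))).take 3) := by
    simp only [suggestedProducts_alt]
    rw [hgo]
    apply List.map_congr_left
    intro j _
    norm_num
  rw [hA, hB]
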